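-- pv_equiv track=rewrite | github.com/raours/algorithm | 백준/Silver/1802. 종이 접기/종이 접기.py | solve
-- ===== SOURCE A (Python) =====
-- def solve(lst):
--     while len(lst)>=3:
--         #접힌 후, 생성된 양 옆이 in, out이 서로 달라야 가능!
--         for i in range(2, len(lst), 2):
--             if lst[i-2] == lst[i]:
--                 return False
--
--         next = []
--         for i in range(1, len(lst),2):
--             #이전 단계에 접힌 부분들 모으기
--             next.append(lst[i])
--         lst = next[:]
--
--     return True
-- ===== SOURCE B (Python) =====
-- def _split(lst):
--     ev, od = [], []
--     for i, x in enumerate(lst):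
--         if i % 2 == 0:
--             ev.append(x)
--         else:
--             od.append(x)
--     return ev, od
--
--
-- def solve(lst):
--     if len(lst) < 3:
--         return True
--     ev, od = _split(lst)
--     if any(a == b for a, b in zip(ev, ev[1:])):
--         return False
--     return solve(od)
-- ===== Notes on version B (the rewrite author's own statement) =====
-- stated objective: alternative
-- what changed: Recursion on the odd-indexed half (depth log n) replaces the while loop, a single enumerate-parity pass splits the level into even/odd layers, and the validity check becomes an adjacent-pair zip over the even layer instead of an indexed range scan.
import Mathlib
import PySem

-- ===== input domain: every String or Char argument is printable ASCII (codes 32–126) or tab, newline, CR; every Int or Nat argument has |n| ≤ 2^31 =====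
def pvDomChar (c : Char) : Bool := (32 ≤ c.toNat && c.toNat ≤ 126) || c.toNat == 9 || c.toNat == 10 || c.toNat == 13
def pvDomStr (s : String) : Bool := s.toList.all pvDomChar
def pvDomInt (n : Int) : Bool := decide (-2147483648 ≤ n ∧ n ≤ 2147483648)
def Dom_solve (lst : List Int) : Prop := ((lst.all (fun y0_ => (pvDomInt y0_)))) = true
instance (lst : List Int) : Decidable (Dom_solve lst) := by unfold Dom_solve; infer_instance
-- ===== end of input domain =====

-- B replaces A's while loop by recursion on the odd-indexed half, splits a level with one
-- enumerate-parity pass, and checks validity as an adjacent-pair zip over the even layer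
-- (objective: alternative; same asymptotic cost).

-- termination-support lemma for the ports (cited in decreasing_by)
theorem length_pyRange_two (a b : Int) :
    (PySem.List.pyRange a b 2).length = if a < b then ((b - a + 1) / 2).toNat else 0 := by
  rw [PySem.List.pyRange_of_pos a b (by norm_num)]
  simp only [List.length_map, List.length_range]
  split_ifs <;> omega

-- ===== PORT A =====
def solve (lst : List Int) : Bool :=
  if _h : 3 ≤ lst.length then
    if (PySem.List.pyRange 2 (lst.length : Int) 2).any
        (fun i => PySem.List.pyGetD lst (i - 2) 0 == PySem.List.pyGetD lst i 0) then
      false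
    else
      solve ((PySem.List.pyRange 1 (lst.length : Int) 2).foldl
        (fun acc i => acc ++ [PySem.List.pyGetD lst i 0]) [])
  else
    true
termination_by lst.length
decreasing_by
  rw [PySem.List.foldl_append_singleton_eq_map, List.nil_append, List.length_map,
    length_pyRange_two]
  split
  · omega
  · omega

-- ===== PORT B =====
-- structural even/odd splitter (proof characterisation of splitPair; cited for termination)
def sp (l : List Int) : List Int × List Int :=
  match l with
  | [] => ([], [])
  | x :: t => (x :: (sp t).2, (sp t).1)

theorem sp_le (l : List Int) : (sp l).1.length ≤ l.length ∧ (sp l).2.length ≤ l.length := by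
  induction l with
  | nil => simp [sp]
  | cons x t ih => simp [sp]; omega

def splitPair (lst : List Int) : List Int × List Int :=
  (PySem.List.enumerate lst 0).foldl
    (fun acc p => if p.1 % 2 == 0 then (acc.1 ++ [p.2], acc.2) else (acc.1, acc.2 ++ [p.2]))
    ([], [])

theorem enum_fold (l : List Int) : ∀ (s : Int) (acc : List Int × List Int), 0 ≤ s →
    (PySem.List.enumerate l s).foldl
      (fun acc p => if p.1 % 2 == 0 then (acc.1 ++ [p.2], acc.2) else (acc.1, acc.2 ++ [p.2]))
      acc
    = if s % 2 == 0 then (acc.1 ++ (sp l).1, acc.2 ++ (sp l).2)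
      else (acc.1 ++ (sp l).2, acc.2 ++ (sp l).1) := by
  induction l with
  | nil =>
    intro s acc _
    rw [PySem.List.enumerate_nil]
    split <;> simp [sp]
  | cons x t ih =>
    intro s acc hs
    rw [PySem.List.enumerate_cons, List.foldl_cons, ih (s + 1) _ (by omega)]
    by_cases hp : s % 2 = 0
    · have h1 : (s % 2 == 0) = true := by simp [hp]
      have h2 : ((s + 1) % 2 == 0) = false := by simp; omega
      simp [h1, h2, sp]
    · have h1 : (s % 2 == 0) = false := by simp [hp]
      have h2 : ((s + 1) % 2 == 0) = true := by simp; omega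
      simp [h1, h2, sp]

theorem splitPair_eq (lst : List Int) : splitPair lst = sp lst := by
  rw [splitPair, enum_fold lst 0 ([], []) (by norm_num)]
  simp

def solve_alt (lst : List Int) : Bool :=
  if _h : lst.length < 3 then
    true
  else
    let p := splitPair lst
    if (p.1.zip (PySem.List.slice p.1 (some 1) none)).any (fun q => q.1 == q.2) then
      false
    else
      solve_alt p.2
termination_by lst.length
decreasing_by
  rw [splitPair_eq]
  cases lst with
  | nil => simp at _h
  | cons x t =>
    have := (sp_le t).1
    simp [sp]
    omega

-- ===== PRECONDITION & SPEC =====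
def Spec_solve (lst : List Int) (out : Bool) : Prop := out = solve_alt lst
instance (lst : List Int) (out : Bool) : Decidable (Spec_solve lst out) := by unfold Spec_solve; infer_instance

-- ===== CLAIM (what is proved, stated in full; the proofs are below) =====
def Claim_equal_solve : Prop := ∀ (lst : List Int), Dom_solve lst → Spec_solve lst (solve lst)

-- ===== LEMMAS AND PROOFS =====

theorem pyGetD_cons_shift (x : Int) (t : List Int) (i : Int) (h : 1 ≤ i) :
    PySem.List.pyGetD (x :: t) i 0 = PySem.List.pyGetD t (i - 1) 0 := by
  rw [PySem.List.pyGetD_of_nonneg _ _ (by omega), PySem.List.pyGetD_of_nonneg _ _ (by omega)]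
  have hi : i.toNat = (i - 1).toNat + 1 := by omega
  rw [hi, List.getD_cons_succ]

theorem pyRange_two_nil (a b : Int) (h : b ≤ a) : PySem.List.pyRange a b 2 = [] := by
  rw [PySem.List.pyRange_of_pos a b (by norm_num), if_neg (by omega)]
  simp

theorem pyRange_two_cons (a b : Int) (h : a < b) :
    PySem.List.pyRange a b 2 = a :: PySem.List.pyRange (a + 2) b 2 := by
  rw [PySem.List.pyRange_of_pos a b (by norm_num),
    PySem.List.pyRange_of_pos (a + 2) b (by norm_num), if_pos h]
  have hn : (b - a + 2 - 1) / 2 ≥ 1 := by omega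
  have hcount : ((b - a + 2 - 1) / 2).toNat
      = (if a + 2 < b then ((b - (a + 2) + 2 - 1) / 2).toNat else 0) + 1 := by
    split <;> omega
  rw [hcount, List.range_succ_eq_map, List.map_cons, List.map_map]
  congr 1
  · simp
  · apply List.map_congr_left
    intro k _
    simp [Function.comp, Nat.succ_eq_add_one]
    ring

theorem map_shift (x : Int) (t : List Int) (a b a' b' : Int) (h : 0 ≤ a')
    (ha : a = a' + 1) (hb : b = b' + 1) :
    (PySem.List.pyRange a b 2).map (fun i => PySem.List.pyGetD (x :: t) i 0)
    = (PySem.List.pyRange a' b' 2).map (fun i => PySem.List.pyGetD t i 0) := by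
  by_cases hab : a' < b'
  · rw [pyRange_two_cons a b (by omega), pyRange_two_cons a' b' hab,
      List.map_cons, List.map_cons]
    have hhd : PySem.List.pyGetD (x :: t) a 0 = PySem.List.pyGetD t a' 0 := by
      rw [pyGetD_cons_shift x t a (by omega)]
      congr 1
      omega
    rw [hhd, map_shift x t (a + 2) b (a' + 2) b' (by omega) (by omega) hb]
  · rw [pyRange_two_nil a b (by omega), pyRange_two_nil a' b' (by omega)]
    simp
termination_by (b' - a').toNat
decreasing_by omega

theorem any_shift (x : Int) (t : List Int) (a b a' b' : Int) (h : 2 ≤ a')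
    (ha : a = a' + 1) (hb : b = b' + 1) :
    (PySem.List.pyRange a b 2).any
      (fun i => PySem.List.pyGetD (x :: t) (i - 2) 0 == PySem.List.pyGetD (x :: t) i 0)
    = (PySem.List.pyRange a' b' 2).any
      (fun i => PySem.List.pyGetD t (i - 2) 0 == PySem.List.pyGetD t i 0) := by
  by_cases hab : a' < b'
  · rw [pyRange_two_cons a b (by omega), pyRange_two_cons a' b' hab,
      List.any_cons, List.any_cons]
    have h1 : PySem.List.pyGetD (x :: t) a 0 = PySem.List.pyGetD t a' 0 := by
      rw [pyGetD_cons_shift x t a (by omega)]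
      congr 1
      omega
    have h2 : PySem.List.pyGetD (x :: t) (a - 2) 0 = PySem.List.pyGetD t (a' - 2) 0 := by
      rw [pyGetD_cons_shift x t (a - 2) (by omega)]
      congr 1
      omega
    rw [h1, h2, any_shift x t (a + 2) b (a' + 2) b' (by omega) (by omega) hb]
  · rw [pyRange_two_nil a b (by omega), pyRange_two_nil a' b' (by omega)]
    simp
termination_by (b' - a').toNat
decreasing_by omega

theorem odds_eq (lst : List Int) :
    (PySem.List.pyRange 1 (lst.length : Int) 2).map (fun i => PySem.List.pyGetD lst i 0)
    = (sp lst).2 := by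
  match lst with
  | [] => rw [show (([] : List Int).length : Int) = 0 by simp, pyRange_two_nil 1 0 (by norm_num)]; simp [sp]
  | [x] => rw [show (([x] : List Int).length : Int) = 1 by simp, pyRange_two_nil 1 1 le_rfl]; simp [sp]
  | x :: y :: t =>
    have hlen : (((x :: y :: t).length : Nat) : Int) = (t.length : Int) + 2 := by
      simp
      ring
    rw [hlen, pyRange_two_cons 1 _ (by omega), List.map_cons]
    have hhd : PySem.List.pyGetD (x :: y :: t) 1 0 = y := by
      rw [pyGetD_cons_shift x (y :: t) 1 (by norm_num)]
      norm_num [PySem.List.pyGetD_zero_cons]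
    rw [show (1:Int) + 2 = 3 from by norm_num] 
    rw [hhd,
      map_shift x (y :: t) 3 ((t.length : Int) + 2) 2 ((t.length : Int) + 1)
        (by norm_num) (by norm_num) (by ring),
      map_shift y t 2 ((t.length : Int) + 1) 1 (t.length : Int)
        (by norm_num) (by norm_num) (by ring),
      odds_eq t]
    simp [sp]
termination_by lst.length

theorem check_eq (lst : List Int) :
    ((PySem.List.pyRange 2 (lst.length : Int) 2).any
      (fun i => PySem.List.pyGetD lst (i - 2) 0 == PySem.List.pyGetD lst i 0))
    = ((sp lst).1.zip (sp lst).1.tail).any (fun q => q.1 == q.2) := by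
  match lst with
  | [] => rw [show (([] : List Int).length : Int) = 0 by simp, pyRange_two_nil 2 0 (by norm_num)]; simp [sp]
  | [x] => rw [show (([x] : List Int).length : Int) = 1 by simp, pyRange_two_nil 2 1 (by norm_num)]; simp [sp]
  | [x, y] => rw [show (([x, y] : List Int).length : Int) = 2 by simp, pyRange_two_nil 2 2 le_rfl]; simp [sp]
  | x :: y :: c :: t =>
    have hlen : (((x :: y :: c :: t).length : Nat) : Int) = (t.length : Int) + 3 := by
      simp
      ring
    rw [hlen, pyRange_two_cons 2 _ (by omega), List.any_cons]
    have hhd2 : PySem.List.pyGetD (x :: y :: c :: t) 2 0 = c := by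
      rw [pyGetD_cons_shift x (y :: c :: t) 2 (by norm_num)]
      norm_num
      rw [pyGetD_cons_shift y (c :: t) 1 (by norm_num)]
      norm_num [PySem.List.pyGetD_zero_cons]
    have hhd0 : PySem.List.pyGetD (x :: y :: c :: t) (2 - 2) 0 = x := by
      norm_num [PySem.List.pyGetD_zero_cons]
    rw [show (2:Int) + 2 = 4 from by norm_num]
    rw [hhd0, hhd2,
      any_shift x (y :: c :: t) 4 ((t.length : Int) + 3) 3 ((t.length : Int) + 2)
        (by norm_num) (by norm_num) (by ring),
      any_shift y (c :: t) 3 ((t.length : Int) + 2) 2 ((t.length : Int) + 1)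
        (by norm_num) (by norm_num) (by ring)]
    have hrec : (((c :: t).length : Nat) : Int) = (t.length : Int) + 1 := by simp
    rw [show ((t.length : Int) + 1) = (((c :: t).length : Nat) : Int) by rw [hrec], check_eq (c :: t)]
    simp [sp]
termination_by lst.length

theorem solve_eq (lst : List Int) : solve lst = solve_alt lst := by
  rw [solve, solve_alt]
  by_cases h : 3 ≤ lst.length
  · rw [dif_pos h, dif_neg (by omega)]
    simp only [splitPair_eq, PySem.List.slice_from_one, check_eq lst]
    by_cases hc : ((sp lst).1.zip (sp lst).1.tail).any (fun q => q.1 == q.2)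
    · rw [if_pos hc, if_pos hc]
    · rw [if_neg hc, if_neg hc,
        PySem.List.foldl_append_singleton_eq_map, List.nil_append, odds_eq lst]
      exact solve_eq (sp lst).2
  · rw [dif_neg h, dif_pos (by omega)]
termination_by lst.length
decreasing_by
  cases lst with
  | nil => simp at h
  | cons x t =>
    have := (sp_le t).1
    simp [sp]
    omega

-- ===== VERDICT (by name: the statement is the Claim_ definition above) =====
theorem solve_spec : Claim_equal_solve := by
  intro lst _
  unfold Spec_solve
  exact solve_eq lst
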